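-- pv_equiv track=rewrite | github.com/dhevinnandyala/ddmm | drakedrakemayemaye/transpiler.py | _match_keyword
-- ===== SOURCE A (Python) =====
-- def _is_identifier_char(ch: str) -> bool:
--     """Check if a character can be part of a Python identifier."""
--     return ch.isalnum() or ch == '_'
--
-- def _match_keyword(source: str, pos: int) -> str | None:
--     """Try to match a drake/maye keyword at position pos with word boundary checks."""
--     for kw in ('drake', 'Drake', 'DRAKE', 'maye', 'Maye', 'MAYE'):
--         end = pos + len(kw)
--         if end > len(source):
--             continue
--         if source[pos:end] == kw:
--             # Check word boundaries
--             if pos > 0 and _is_identifier_char(source[pos - 1]):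
--                 continue
--             if end < len(source) and _is_identifier_char(source[end]):
--                 continue
--             return kw
--     return None
-- ===== SOURCE B (Python) =====
-- _KEYWORDS = frozenset(('drake', 'Drake', 'DRAKE', 'maye', 'Maye', 'MAYE'))
--
-- def _is_identifier_char(ch: str) -> bool:
--     """Check if a character can be part of a Python identifier."""
--     return ch.isalnum() or ch == '_'
--
-- def _match_keyword(source: str, pos: int) -> str | None:
--     """Scan the identifier word starting at pos and test it against the keyword set."""
--     n = len(source)
--     if pos < 0 or pos > n:
--         return None
--     if pos > 0 and _is_identifier_char(source[pos - 1]):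
--         return None
--     word = ''
--     for ch in source[pos:]:
--         if not _is_identifier_char(ch):
--             break
--         word += ch
--     return word if word in _KEYWORDS else None
-- ===== Notes on version B (the rewrite author's own statement) =====
-- stated objective: simpler
-- what changed: B replaces A's six-keyword loop of slice comparisons with boundary checks per keyword by one left-boundary guard, a single forward scan that captures the identifier word starting at pos, and one membership test of that word in a frozenset of the six keywords.
-- intended difference: For negative pos where source contains a keyword at the Python-wraparound position pos+len(source) (with pos+len(kw) still negative and a non-identifier character right after the word), A returns that keyword because its slice and right-boundary index silently wrap around while the left-boundary check is skipped; B returns None, the intended value, since a negative position is never a valid scan position in the transpiler. — e.g. on _match_keyword("drake ", -6): A returns some "drake", B returns none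
import Mathlib
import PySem

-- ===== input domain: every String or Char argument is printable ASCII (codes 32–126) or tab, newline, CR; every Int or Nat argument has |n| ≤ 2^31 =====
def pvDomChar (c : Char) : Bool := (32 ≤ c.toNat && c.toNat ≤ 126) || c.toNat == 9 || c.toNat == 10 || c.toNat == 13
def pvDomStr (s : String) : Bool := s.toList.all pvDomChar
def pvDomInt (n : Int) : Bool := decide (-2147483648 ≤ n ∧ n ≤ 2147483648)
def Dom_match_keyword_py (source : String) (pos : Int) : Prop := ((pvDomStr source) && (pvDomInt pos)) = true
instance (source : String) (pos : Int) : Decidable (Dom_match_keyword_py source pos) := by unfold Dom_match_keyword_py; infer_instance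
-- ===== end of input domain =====

-- B replaces A's six-keyword slice-comparison loop by one forward scan of the identifier word
-- at pos plus a single set-membership test (objective: simpler); return values only, no mutation.

-- ===== PORT A =====
def pvIsIdent (ch : Char) : Bool := PySem.Chars.isalnum ch || ch == '_'

def pvKws : List String := ["drake", "Drake", "DRAKE", "maye", "Maye", "MAYE"]

def pvTryKw (cs : List Char) (pos : Int) (kw : String) : Option String :=
  let e : Int := pos + kw.toList.length
  if e > (cs.length : Int) then none
  else if PySem.List.slice cs (some pos) (some e) = kw.toList then
    if 0 < pos ∧ (PySem.List.pyGet? cs (pos - 1)).any pvIsIdent then none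
    else if e < (cs.length : Int) ∧ (PySem.List.pyGet? cs e).any pvIsIdent then none
    else some kw
  else none

def pvLoopA (cs : List Char) (pos : Int) : List String → Option String
  | [] => none
  | kw :: rest =>
    match pvTryKw cs pos kw with
    | some w => some w
    | none => pvLoopA cs pos rest

def match_keyword_py (source : String) (pos : Int) : Option String :=
  pvLoopA source.toList pos pvKws

-- ===== PORT B =====
def pvKwSet : PySem.Set String := PySem.Set.ofList pvKws

def pvGrab : List Char → List Char
  | [] => []
  | c :: rest => if pvIsIdent c then c :: pvGrab rest else []

def match_keyword_py_alt (source : String) (pos : Int) : Option String :=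
  let cs := source.toList
  if pos < 0 ∨ pos > (cs.length : Int) then none
  else if 0 < pos ∧ (PySem.List.pyGet? cs (pos - 1)).any pvIsIdent then none
  else
    let word := String.ofList (pvGrab (PySem.List.slice cs (some pos) none))
    if PySem.Set.contains pvKwSet word then some word else none

-- ===== PRECONDITION & SPEC =====
-- For negative pos at which source contains a keyword at the Python-wraparound position
-- pos+len(source) (with pos+len(kw) still negative and a non-identifier character after the word),
-- A returns that keyword because the slice and the right-boundary index silently wrap around while
-- the left-boundary check is skipped; B returns none, the intended value, since a negative
-- position is not a valid scan position in the transpiler.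
def D_match_keyword_py (source : String) (pos : Int) : Prop :=
  pos < 0 ∧ ∃ kw ∈ pvKws,
    0 ≤ pos + (source.toList.length : Int) ∧
    pos + (kw.toList.length : Int) < 0 ∧
    (source.toList.drop (pos + (source.toList.length : Int)).toNat).take kw.toList.length = kw.toList ∧
    pvIsIdent (source.toList.getD
      (pos + (source.toList.length : Int) + (kw.toList.length : Int)).toNat ' ') = false
instance (source : String) (pos : Int) : Decidable (D_match_keyword_py source pos) := by
  unfold D_match_keyword_py; infer_instance

def Spec_match_keyword_py (source : String) (pos : Int) (out : Option String) : Prop :=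
  ¬ D_match_keyword_py source pos → out = match_keyword_py_alt source pos
instance (source : String) (pos : Int) (out : Option String) : Decidable (Spec_match_keyword_py source pos out) := by
  unfold Spec_match_keyword_py; infer_instance

def pvDiffWitness_match_keyword_py : String × Int := ("drake ", -6)
def pvDiffWitnessOut_match_keyword_py : (Option String) × (Option String) := (some "drake", none)

-- ===== CLAIM (what is proved, stated in full; the proofs are below) =====
def Claim_unchanged_match_keyword_py : Prop := ∀ (source : String) (pos : Int), Dom_match_keyword_py source pos → Spec_match_keyword_py source pos (match_keyword_py source pos)
def Claim_changed_match_keyword_py : Prop := Dom_match_keyword_py (pvDiffWitness_match_keyword_py.1) (pvDiffWitness_match_keyword_py.2) ∧ D_match_keyword_py (pvDiffWitness_match_keyword_py.1) (pvDiffWitness_match_keyword_py.2) ∧ match_keyword_py (pvDiffWitness_match_keyword_py.1) (pvDiffWitness_match_keyword_py.2) = pvDiffWitnessOut_match_keyword_py.1 ∧ match_keyword_py_alt (pvDiffWitness_match_keyword_py.1) (pvDiffWitness_match_keyword_py.2) = pvDiffWitnessOut_match_keyword_py.2 ∧ pvDiffWitnessOut_match_keyword_py.1 ≠ pvDiffW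itnessOut_match_keyword_py.2
def Claim_exact_match_keyword_py : Prop := ∀ (source : String) (pos : Int), Dom_match_keyword_py source pos → D_match_keyword_py source pos → match_keyword_py source pos ≠ match_keyword_py_alt source pos

-- ===== LEMMAS AND PROOFS =====

theorem pvKw_facts (kw : String) (hk : kw ∈ pvKws) :
    kw.toList.all pvIsIdent = true ∧ 1 ≤ kw.toList.length := by
  simp only [pvKws, List.mem_cons, List.not_mem_nil, or_false] at hk
  rcases hk with h | h | h | h | h | h <;> subst h <;> exact ⟨by decide, by decide⟩

theorem pvGrab_length_le (l : List Char) : (pvGrab l).length ≤ l.length := by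
  induction l with
  | nil => simp [pvGrab]
  | cons c t ih =>
    simp only [pvGrab]
    split
    · simpa using Nat.succ_le_succ ih
    · simp

theorem pvGrab_eq_iff (kw : List Char) (hall : kw.all pvIsIdent = true) (l : List Char) :
    pvGrab l = kw ↔ (l.take kw.length = kw ∧ ∀ c, l[kw.length]? = some c → pvIsIdent c = false) := by
  induction kw generalizing l with
  | nil =>
    cases l with
    | nil => simp [pvGrab]
    | cons c t =>
      by_cases hc : pvIsIdent c <;> simp [pvGrab, hc]
  | cons a kw' ih =>
    have hall2 := hall
    simp only [List.all_cons, Bool.and_eq_true] at hall2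
    obtain ⟨ha, hall'⟩ := hall2
    cases l with
    | nil => simp [pvGrab]
    | cons c t =>
      by_cases hc : pvIsIdent c
      · simp only [pvGrab, hc, if_pos, List.length_cons, List.take_succ_cons,
          List.getElem?_cons_succ, List.cons.injEq]
        rw [ih hall' t]
        tauto
      · constructor
        · intro h
          simp [pvGrab, hc] at h
        · rintro ⟨h1, -⟩
          exfalso
          have hca : c = a := by
            simp only [List.length_cons, List.take_succ_cons, List.cons.injEq] at h1
            exact h1.1
          rw [hca] at hc
          exact hc ha

theorem pv_slice_negneg (xs : List Char) (a b : Int) (ha : a < 0) (h0 : 0 ≤ (xs.length : Int) + a)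
    (hb : b < 0) (hab : a ≤ b) :
    PySem.List.slice xs (some a) (some b)
      = (xs.drop ((xs.length : Int) + a).toNat).take (b - a).toNat := by
  unfold PySem.List.slice PySem.List.clampIdx
  simp only [if_pos ha, if_pos hb,
    if_neg (show ¬(xs.length : Int) + a < 0 by omega),
    if_neg (show ¬(xs.length : Int) + b < 0 by omega)]
  congr 1
  omega

theorem pv_pyGet_neg (xs : List Char) (i : Int) (h : -(xs.length : Int) ≤ i) (h2 : i < 0) :
    PySem.List.pyGet? xs i = xs[((xs.length : Int) + i).toNat]? := by
  unfold PySem.List.pyGet? PySem.List.pyIdx?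
  rw [if_neg (by omega), if_pos (by omega)]
  simp only [Option.bind_some]
  congr 1
  omega

-- A's per-keyword check agrees with "the scanned word equals this keyword" (nonnegative pos, left boundary ok)
theorem pvTryKw_char (cs : List Char) (pos : Int) (kw : String) (hk : kw ∈ pvKws)
    (h0 : 0 ≤ pos) (hn : pos ≤ (cs.length : Int))
    (hleft : ¬(0 < pos ∧ ((PySem.List.pyGet? cs (pos - 1)).any pvIsIdent) = true)) :
    pvTryKw cs pos kw
      = (if pvGrab (cs.drop pos.toNat) = kw.toList then some kw else none) := by
  obtain ⟨hall, hlen⟩ := pvKw_facts kw hk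
  have hiff := pvGrab_eq_iff kw.toList hall (cs.drop pos.toNat)
  unfold pvTryKw
  simp only
  by_cases he : pos + (kw.toList.length : Int) > (cs.length : Int)
  · rw [if_pos he, if_neg]
    intro heq
    have h1 := pvGrab_length_le (cs.drop pos.toNat)
    rw [heq] at h1
    simp only [List.length_drop] at h1
    omega
  · rw [if_neg he]
    have hsl : PySem.List.slice cs (some pos) (some (pos + (kw.toList.length : Int)))
        = (cs.drop pos.toNat).take kw.toList.length := by
      rw [PySem.List.slice_toNat cs h0 (by omega)]
      congr 1
      omega
    rw [hsl]
    have hidx : PySem.List.pyGet? cs (pos + (kw.toList.length : Int))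
        = (cs.drop pos.toNat)[kw.toList.length]? := by
      rw [PySem.List.pyGet?_of_nonneg cs (by omega), List.getElem?_drop]
      congr 1
      omega
    by_cases htake : (cs.drop pos.toNat).take kw.toList.length = kw.toList
    · rw [if_pos htake, if_neg hleft]
      rcases hO : (cs.drop pos.toNat)[kw.toList.length]? with _ | c
      · have hnone : ¬(pos + (kw.toList.length : Int) < (cs.length : Int)
            ∧ ((PySem.List.pyGet? cs (pos + (kw.toList.length : Int))).any pvIsIdent) = true) := by
          rintro ⟨h1, -⟩
          have : (cs.drop pos.toNat)[kw.toList.length]? ≠ none := by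
            rw [ne_eq, List.getElem?_eq_none_iff]
            simp only [List.length_drop]
            omega
          exact this hO
        rw [if_neg hnone, if_pos (hiff.mpr ⟨htake, by intro c hc; rw [hO] at hc; cases hc⟩)]
      · have hsome : pos + (kw.toList.length : Int) < (cs.length : Int) := by
          obtain ⟨hlt, -⟩ := List.getElem?_eq_some_iff.mp hO
          simp only [List.length_drop] at hlt
          omega
        by_cases hid : pvIsIdent c = true
        · rw [if_pos ⟨hsome, by rw [hidx, hO]; simpa using hid⟩, if_neg]
          intro heq
          have := (hiff.mp heq).2 c hO
          rw [hid] at this; cases this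
        · rw [if_neg (by rintro ⟨-, h2⟩; rw [hidx, hO] at h2; simp at h2; exact hid h2),
            if_pos (hiff.mpr ⟨htake, by intro c' hc'; rw [hO] at hc'; cases hc'; simpa using hid⟩)]
    · rw [if_neg htake, if_neg]
      intro heq
      exact htake (hiff.mp heq).1

theorem pvLoopA_char (cs : List Char) (pos : Int)
    (h0 : 0 ≤ pos) (hn : pos ≤ (cs.length : Int))
    (hleft : ¬(0 < pos ∧ ((PySem.List.pyGet? cs (pos - 1)).any pvIsIdent) = true))
    (l : List String) (hl : ∀ kw ∈ l, kw ∈ pvKws) :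
    pvLoopA cs pos l = l.find? (fun kw => pvGrab (cs.drop pos.toNat) == kw.toList) := by
  induction l with
  | nil => simp [pvLoopA]
  | cons kw rest ih =>
    have hk : kw ∈ pvKws := hl kw (by simp)
    rw [List.find?_cons]
    simp only [pvLoopA]
    rw [pvTryKw_char cs pos kw hk h0 hn hleft]
    by_cases hg : pvGrab (cs.drop pos.toNat) = kw.toList
    · rw [if_pos hg]
      simp [hg]
    · rw [if_neg hg]
      have hb : (pvGrab (List.drop pos.toNat cs) == kw.toList) = false := by simp [hg]
      rw [hb]
      simpa using ih (fun k hm => hl k (by simp [hm]))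

theorem pvLoopA_none (cs : List Char) (pos : Int) (l : List String)
    (h : ∀ kw ∈ l, pvTryKw cs pos kw = none) : pvLoopA cs pos l = none := by
  induction l with
  | nil => rfl
  | cons kw rest ih =>
    simp only [pvLoopA, h kw (by simp)]
    exact ih (fun k hm => h k (by simp [hm]))

theorem pvLoopA_ne_none (cs : List Char) (pos : Int) (l : List String) (kw : String)
    (hm : kw ∈ l) (h : pvTryKw cs pos kw = some kw) : pvLoopA cs pos l ≠ none := by
  induction l with
  | nil => cases hm
  | cons k rest ih =>
    simp only [pvLoopA]
    rcases List.mem_cons.mp hm with rfl | hm'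
    · rw [h]; simp
    · cases hx : pvTryKw cs pos k with
      | some w => simp
      | none => exact ih hm'

-- the membership test over the keyword set agrees with the first-match search over the keyword list
theorem pv_find_eq_contains (g : List Char) :
    pvKws.find? (fun kw => g == kw.toList)
      = (if PySem.Set.contains pvKwSet (String.ofList g) then some (String.ofList g) else none) := by
  by_cases hc : String.ofList g ∈ pvKws
  · simp only [pvKws, List.mem_cons, List.not_mem_nil, or_false] at hc
    rcases hc with h | h | h | h | h | h <;>
    · have hg : g = (String.ofList g).toList := by simp
      rw [h] at hg
      subst hg
      decide
  · have hnone : ∀ kw ∈ pvKws, ¬(g == kw.toList) = true := by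
      intro kw hkw hbeq
      have hg : g = kw.toList := by simpa using hbeq
      apply hc
      have : String.ofList kw.toList = kw := String.toList_inj.mp (by simp)
      rw [hg, this]
      exact hkw
    rw [List.find?_eq_none.mpr hnone, if_neg]
    intro hmem
    have : String.ofList g ∈ pvKws := by
      have := hmem
      simp only [PySem.Set.contains, pvKwSet] at this
      have hx : String.ofList g ∈ PySem.Set.ofList pvKws := by simpa using this
      exact (PySem.Set.mem_ofList _ _).mp hx
    exact hc this

-- B's branches, unfolded
theorem pv_alt_neg (source : String) (pos : Int) (h : pos < 0 ∨ pos > (source.toList.length : Int)) :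
    match_keyword_py_alt source pos = none := by
  unfold match_keyword_py_alt
  simp only
  rw [if_pos h]

theorem pv_alt_left (source : String) (pos : Int)
    (h1 : ¬(pos < 0 ∨ pos > (source.toList.length : Int)))
    (h2 : 0 < pos ∧ ((PySem.List.pyGet? source.toList (pos - 1)).any pvIsIdent) = true) :
    match_keyword_py_alt source pos = none := by
  unfold match_keyword_py_alt
  simp only
  rw [if_neg h1, if_pos h2]

theorem pv_alt_main (source : String) (pos : Int)
    (h1 : ¬(pos < 0 ∨ pos > (source.toList.length : Int)))
    (h2 : ¬(0 < pos ∧ ((PySem.List.pyGet? source.toList (pos - 1)).any pvIsIdent) = true)) :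
    match_keyword_py_alt source pos
      = (if PySem.Set.contains pvKwSet (String.ofList (pvGrab (source.toList.drop pos.toNat)))
         then some (String.ofList (pvGrab (source.toList.drop pos.toNat))) else none) := by
  unfold match_keyword_py_alt
  simp only
  rw [if_neg h1, if_neg h2, PySem.List.slice_from _ (by omega)]

theorem pv_clampIdx_eq (n : Nat) (i : Int) :
    PySem.List.clampIdx n i
      = if i < 0 then (if (n : Int) + i < 0 then 0 else ((n : Int) + i).toNat)
        else min i.toNat n := by
  unfold PySem.List.clampIdx
  rfl

-- pos < 0 and A's per-keyword check succeeds implies the wraparound region D_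
theorem pvTryKw_neg_some (source : String) (pos : Int) (kw : String) (hk : kw ∈ pvKws)
    (hneg : pos < 0) (hs : pvTryKw source.toList pos kw ≠ none) :
    D_match_keyword_py source pos := by
  obtain ⟨hall, hlen⟩ := pvKw_facts kw hk
  unfold pvTryKw at hs
  set cs := source.toList with hcs
  set k : Int := (kw.toList.length : Int) with hkdef
  by_cases he : pos + k > (cs.length : Int)
  · rw [if_pos he] at hs; exact absurd rfl hs
  rw [if_neg he] at hs
  by_cases hsl : PySem.List.slice cs (some pos) (some (pos + k)) = kw.toList
  swap
  · rw [if_neg hsl] at hs; exact absurd rfl hs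
  rw [if_pos hsl] at hs
  have hlen2 := congrArg List.length hsl
  rw [PySem.List.length_slice] at hlen2
  obtain ⟨hek, hnp⟩ : pos + k < 0 ∧ 0 ≤ (cs.length : Int) + pos := by
    rw [pv_clampIdx_eq, pv_clampIdx_eq] at hlen2
    split_ifs at hlen2 <;> omega
  rw [if_neg (by rintro ⟨h, -⟩; omega)] at hs
  have hE : pos + k < (cs.length : Int) := by omega
  by_cases hr : ((PySem.List.pyGet? cs (pos + k)).any pvIsIdent) = true
  · rw [if_pos ⟨hE, hr⟩] at hs; exact absurd rfl hs
  rw [if_neg (by rintro ⟨-, h⟩; exact hr h)] at hs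
  -- build D_
  refine ⟨hneg, kw, hk, by rw [← hcs]; omega, by rw [← hkdef]; omega, ?_, ?_⟩
  · have := pv_slice_negneg cs pos (pos + k) hneg (by omega) hek (by omega)
    rw [this] at hsl
    have harith : (pos + k - pos).toNat = kw.toList.length := by omega
    rw [harith] at hsl
    have harith2 : ((cs.length : Int) + pos).toNat = (pos + (cs.length : Int)).toNat := by omega
    rw [harith2] at hsl
    exact hsl
  · have hg := pv_pyGet_neg cs (pos + k) (by omega) hek
    have hin : ((cs.length : Int) + (pos + k)).toNat < cs.length := by omega
    rw [List.getElem?_eq_getElem hin] at hg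
    have hgd : cs.getD (pos + (cs.length : Int) + k).toNat ' '
        = cs[((cs.length : Int) + (pos + k)).toNat] := by
      rw [List.getD_eq_getElem?_getD, List.getElem?_eq_getElem (by omega)]
      simp only [Option.getD_some]
      congr 1
      omega
    rw [hgd]
    by_contra hid
    exact hr (by rw [hg]; simpa using (by simpa using hid : pvIsIdent _ = true))

-- D_ implies A's check succeeds for the witnessing keyword
theorem pvTryKw_of_D (source : String) (pos : Int) (kw : String)
    (hneg : pos < 0)
    (hnp : 0 ≤ pos + (source.toList.length : Int))
    (hek : pos + (kw.toList.length : Int) < 0)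
    (htk : (source.toList.drop (pos + (source.toList.length : Int)).toNat).take kw.toList.length = kw.toList)
    (hch : pvIsIdent (source.toList.getD
      (pos + (source.toList.length : Int) + (kw.toList.length : Int)).toNat ' ') = false) :
    pvTryKw source.toList pos kw = some kw := by
  set cs := source.toList with hcs
  set k : Int := (kw.toList.length : Int) with hkdef
  unfold pvTryKw
  simp only
  rw [if_neg (show ¬pos + k > (cs.length : Int) by omega)]
  have hsl : PySem.List.slice cs (some pos) (some (pos + k)) = kw.toList := by
    rw [pv_slice_negneg cs pos (pos + k) hneg (by omega) hek (by omega)]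
    have harith : (pos + k - pos).toNat = kw.toList.length := by omega
    have harith2 : ((cs.length : Int) + pos).toNat = (pos + (cs.length : Int)).toNat := by omega
    rw [harith, harith2]
    exact htk
  rw [if_pos hsl, if_neg (by rintro ⟨h, -⟩; omega), if_neg]
  rintro ⟨-, hany⟩
  have hg := pv_pyGet_neg cs (pos + k) (by omega) hek
  have hin : ((cs.length : Int) + (pos + k)).toNat < cs.length := by omega
  rw [List.getElem?_eq_getElem hin] at hg
  rw [hg] at hany
  simp only [Option.any_some] at hany
  have hgd : cs.getD (pos + (cs.length : Int) + k).toNat ' '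
      = cs[((cs.length : Int) + (pos + k)).toNat] := by
    rw [List.getD_eq_getElem?_getD, List.getElem?_eq_getElem (by omega)]
    simp only [Option.getD_some]
    congr 1
    omega
  rw [hgd, hany] at hch
  cases hch

-- ===== VERDICT (by name: the statement is the Claim_ definition above) =====
theorem match_keyword_py_spec : Claim_unchanged_match_keyword_py := by
  intro source pos _hdom hnd
  unfold match_keyword_py
  by_cases hneg : pos < 0
  · rw [pv_alt_neg source pos (Or.inl hneg)]
    apply pvLoopA_none
    intro kw hk
    by_contra hs
    exact hnd (pvTryKw_neg_some source pos kw hk hneg hs)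
  · push_neg at hneg
    by_cases hbig : pos > (source.toList.length : Int)
    · rw [pv_alt_neg source pos (Or.inr hbig)]
      apply pvLoopA_none
      intro kw hk
      unfold pvTryKw
      rw [if_pos (by have : (0:Int) ≤ (kw.toList.length : Int) := Int.natCast_nonneg _; omega)]
    · by_cases hleft : 0 < pos ∧ ((PySem.List.pyGet? source.toList (pos - 1)).any pvIsIdent) = true
      · rw [pv_alt_left source pos (by push_neg; exact ⟨by omega, by omega⟩) hleft]
        apply pvLoopA_none
        intro kw hk
        unfold pvTryKw
        by_cases he : pos + (kw.toList.length : Int) > (source.toList.length : Int)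
        · rw [if_pos he]
        · rw [if_neg he]
          by_cases hsl : PySem.List.slice source.toList (some pos)
              (some (pos + (kw.toList.length : Int))) = kw.toList
          · rw [if_pos hsl, if_pos hleft]
          · rw [if_neg hsl]
      · rw [pv_alt_main source pos (by push_neg; exact ⟨by omega, by omega⟩) hleft,
          pvLoopA_char source.toList pos hneg (by omega) hleft pvKws (fun kw hk => hk),
          pv_find_eq_contains]

theorem match_keyword_py_changed : Claim_changed_match_keyword_py := by
  unfold Claim_changed_match_keyword_py
  exact ⟨by decide, by decide, by decide, by decide, by decide⟩

theorem match_keyword_py_tight : Claim_exact_match_keyword_py := by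
  intro source pos _hdom hd
  obtain ⟨hneg, kw, hk, hnp, hek, htk, hch⟩ := hd
  rw [pv_alt_neg source pos (Or.inl hneg)]
  unfold match_keyword_py
  exact pvLoopA_ne_none source.toList pos pvKws kw hk
    (pvTryKw_of_D source pos kw hneg hnp hek htk hch)
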